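-- pv_equiv track=rewrite | github.com/adcosta17/Retrotransposon-insert-detection | scripts/update_ambiguous.py | get_family_str
-- ===== SOURCE A (Python) =====
-- def multiple_families(family_count, read_name, insert_position):
--     count = 0
--     if read_name not in family_count:
--         return False
--     if insert_position not in family_count[read_name]:
--         return False
--     for item in family_count[read_name][insert_position]:
--         if len(family_count[read_name][insert_position][item]) > 0:
--             count += 1
--     if count > 1:
--         return True
--     return False
--
-- def get_family_str(family_count, read_name, insert_position):
--     if multiple_families(family_count, read_name, insert_position):
--         ret = "ambiguous_mapping"
--         for item in family_count[read_name][insert_position]: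
--             if len(family_count[read_name][insert_position][item]) > 0:
--                 ret = ret +"_"+item
--         return ret
--     else:
--         ret = "resolved"
--         for item in family_count[read_name][insert_position]:
--             if len(family_count[read_name][insert_position][item]) > 0:
--                 ret = ret +"_"+item
--         return ret
-- ===== SOURCE B (Python) =====
-- def get_family_str(family_count, read_name, insert_position):
--     # single recursive pass over the items: returns (count of non-empty families,
--     # suffix "_f1_f2..." built back-to-front); prefix chosen once at the end.
--     def go(items):
--         if not items:
--             return 0, ""
--         (name, hits) = items[0]
--         n, suffix = go(items[1:])
--         if hits:
--             return n + 1, "_" + name + suffix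
--         return n, suffix
--     n, suffix = go(list(family_count[read_name][insert_position].items()))
--     return ("ambiguous_mapping" if n > 1 else "resolved") + suffix
-- ===== Notes on version B (the rewrite author's own statement) =====
-- stated objective: alternative
-- what changed: Replaced A's two independent forward loops (one counting non-empty families to pick the prefix, then a duplicated string-appending loop in each branch) with one structural recursion over the items list that computes the count and the joined suffix together in a single back-to-front pass, prepending the prefix once at the end.
-- outside the precondition, e.g. on get_family_str({}, 'r', 'p'): A raises KeyError, B raises KeyError; on get_family_str({'r': {}}, 'r', 'p'): A raises KeyError, B raises KeyError
import Mathlib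
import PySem

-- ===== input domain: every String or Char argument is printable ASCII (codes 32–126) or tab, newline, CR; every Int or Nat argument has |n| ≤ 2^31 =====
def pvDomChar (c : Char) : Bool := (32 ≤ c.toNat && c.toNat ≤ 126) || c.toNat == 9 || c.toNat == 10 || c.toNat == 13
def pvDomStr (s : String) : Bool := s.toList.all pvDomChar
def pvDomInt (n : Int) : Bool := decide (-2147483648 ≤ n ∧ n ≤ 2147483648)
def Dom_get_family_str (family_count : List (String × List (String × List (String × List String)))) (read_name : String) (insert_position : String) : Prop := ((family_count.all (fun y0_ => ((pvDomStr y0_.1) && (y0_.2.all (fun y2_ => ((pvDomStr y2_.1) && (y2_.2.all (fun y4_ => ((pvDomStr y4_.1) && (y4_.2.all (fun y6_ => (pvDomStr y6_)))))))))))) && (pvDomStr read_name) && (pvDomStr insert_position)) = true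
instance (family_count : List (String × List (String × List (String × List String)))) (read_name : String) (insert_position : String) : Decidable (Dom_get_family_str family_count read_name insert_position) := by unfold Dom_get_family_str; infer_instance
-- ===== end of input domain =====

-- B replaces A's two forward loops (count pass, then a duplicated append pass) with one
-- recursion over the items computing count and suffix together (objective: alternative).
-- Missing read_name/insert_position keys make A's else-branch raise KeyError (B raises too): outside Pre_.

-- ===== PORT A =====
-- 'for item in d: if len(d[item]) > 0: count += 1'
def pvCountLoop (d : PySem.Dict String (List String)) : Int :=
  d.keys.foldl (fun count item => if 0 < (d.getD item []).length then count + 1 else count) 0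

def multiple_families (family_count : List (String × List (String × List (String × List String)))) (read_name : String) (insert_position : String) : Bool :=
  match (PySem.Dict.ofList family_count).get? read_name with
  | none => false
  | some l1 =>
    match (PySem.Dict.ofList l1).get? insert_position with
    | none => false
    | some l2 => decide (1 < pvCountLoop (PySem.Dict.ofList l2))

-- 'for item in d: if len(d[item]) > 0: ret = ret + "_" + item'
def pvAppendLoop (d : PySem.Dict String (List String)) (ret : String) : String :=
  d.keys.foldl (fun ret item => if 0 < (d.getD item []).length then ret ++ "_" ++ item else ret) ret

def get_family_str (family_count : List (String × List (String × List (String × List String)))) (read_name : String) (insert_position : String) : String :=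
  let d := PySem.Dict.ofList ((PySem.Dict.ofList ((PySem.Dict.ofList family_count).getD read_name [])).getD insert_position [])
  if multiple_families family_count read_name insert_position then
    pvAppendLoop d "ambiguous_mapping"
  else
    pvAppendLoop d "resolved"

-- ===== PORT B =====
-- 'def go(items): …' — one structural recursion returning (count, suffix)
def pvGo : List (String × List String) → Int × String
  | [] => (0, "")
  | (name, hits) :: rest =>
    let r := pvGo rest
    if hits ≠ [] then (r.1 + 1, "_" ++ name ++ r.2) else r

def get_family_str_alt (family_count : List (String × List (String × List (String × List String)))) (read_name : String) (insert_position : String) : String :=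
  let fams := PySem.Dict.ofList ((PySem.Dict.ofList ((PySem.Dict.ofList family_count).getD read_name [])).getD insert_position [])
  let r := pvGo fams.items
  (if 1 < r.1 then "ambiguous_mapping" else "resolved") ++ r.2

-- ===== PRECONDITION & SPEC =====
-- Pre_ excludes exactly the inputs where read_name or insert_position is a missing key: there A's else-branch
-- (and B's direct indexing) raises KeyError, so A returns no value.
def Pre_get_family_str (family_count : List (String × List (String × List (String × List String)))) (read_name : String) (insert_position : String) : Prop :=
  (((PySem.Dict.ofList family_count).get? read_name).map
    (fun l1 => (PySem.Dict.ofList l1).contains insert_position)).getD false = true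
instance (family_count : List (String × List (String × List (String × List String)))) (read_name : String) (insert_position : String) : Decidable (Pre_get_family_str family_count read_name insert_position) := by unfold Pre_get_family_str; infer_instance

def pvWitness_get_family_str : (List (String × List (String × List (String × List String)))) × String × String :=
  ([("r", [("p", [("LINE", ["a1"]), ("ALU", [])])])], "r", "p")

def Spec_get_family_str (family_count : List (String × List (String × List (String × List String)))) (read_name : String) (insert_position : String) (out : String) : Prop := out = get_family_str_alt family_count read_name insert_position
instance (family_count : List (String × List (String × List (String × List String)))) (read_name : String) (insert_position : String) (out : String) : Decidable (Spec_get_family_str family_count read_name insert_position out) := by unfold Spec_get_family_str; infer_instance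

-- ===== CLAIM =====
def Claim_equal_get_family_str : Prop := ∀ (family_count : List (String × List (String × List (String × List String)))) (read_name : String) (insert_position : String), Dom_get_family_str family_count read_name insert_position → Pre_get_family_str family_count read_name insert_position → Spec_get_family_str family_count read_name insert_position (get_family_str family_count read_name insert_position)

-- ===== LEMMAS AND PROOFS =====

-- A's count loop over keys equals the first component of B's recursion over items.
theorem countLoop_eq_go_fst (d : PySem.Dict String (List String)) (hnd : d.keys.Nodup) :
    pvCountLoop d = (pvGo d.items).1 := by
  unfold pvCountLoop
  rw [PySem.Dict.items_eq_map_keys d hnd []]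
  have h : ∀ (ks : List String) (n : Int),
      ks.foldl (fun count item => if 0 < (d.getD item []).length then count + 1 else count) n
        = n + (pvGo (ks.map (fun k => (k, d.getD k [])))).1 := by
    intro ks
    induction ks with
    | nil => simp [pvGo]
    | cons k ks ih =>
      intro n
      by_cases hk : d.getD k [] = []
      · simp [pvGo, hk, ih]
      · have hlen : 0 < (d.getD k []).length := List.length_pos_of_ne_nil hk
        simp only [List.map_cons, List.foldl_cons, pvGo, hk, hlen, if_pos, ne_eq,
          not_false_eq_true, ih]
        omega
  simpa using h d.keys 0

-- A's append loop over keys equals prefix ++ (second component of B's recursion over items).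
theorem appendLoop_eq_go_snd (d : PySem.Dict String (List String)) (hnd : d.keys.Nodup) (pre : String) :
    pvAppendLoop d pre = pre ++ (pvGo d.items).2 := by
  unfold pvAppendLoop
  rw [PySem.Dict.items_eq_map_keys d hnd []]
  have h : ∀ (ks : List String) (pre : String),
      ks.foldl (fun ret item => if 0 < (d.getD item []).length then ret ++ "_" ++ item else ret) pre
        = pre ++ (pvGo (ks.map (fun k => (k, d.getD k [])))).2 := by
    intro ks
    induction ks with
    | nil => intro pre; simp [pvGo]
    | cons k ks ih =>
      intro pre
      by_cases hk : d.getD k [] = []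
      · simp [pvGo, hk, ih]
      · have hlen : 0 < (d.getD k []).length := List.length_pos_of_ne_nil hk
        simp only [List.map_cons, List.foldl_cons, pvGo, hk, hlen, if_pos, ne_eq,
          not_false_eq_true, ih]
        simp [String.append_assoc]
  exact h d.keys pre

theorem get_family_str_spec : Claim_equal_get_family_str := by
  intro fc rn ip _hdom hpre
  unfold Spec_get_family_str get_family_str get_family_str_alt multiple_families
  unfold Pre_get_family_str at hpre
  cases hget : (PySem.Dict.ofList fc).get? rn with
  | none => rw [hget] at hpre; simp at hpre
  | some l1 =>
    rw [hget] at hpre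
    simp only [Option.map_some, Option.getD_some] at hpre
    cases hget2 : (PySem.Dict.ofList l1).get? ip with
    | none =>
      exfalso
      rw [PySem.Dict.contains_eq_isSome_get? _ _, hget2] at hpre
      simp at hpre
    | some l2 =>
      rw [PySem.Dict.getD_of_get?_eq_some _ _ hget, PySem.Dict.getD_of_get?_eq_some _ _ hget2]
      simp only [hget2]
      have hnd := PySem.Dict.nodup_keys_ofList (ps := l2)
      rw [countLoop_eq_go_fst _ hnd, appendLoop_eq_go_snd _ hnd, appendLoop_eq_go_snd _ hnd]
      by_cases h : 1 < (pvGo (PySem.Dict.ofList l2).items).1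
      · simp [h]
      · simp [h]
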